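-- pv_equiv track=rewrite | github.com/jtamames/SqueezeMeta | bin/Flye-2.8.1/flye/trestle/trestle.py | _integrate_confirmed_pos
-- ===== SOURCE A (Python) =====
-- def _integrate_confirmed_pos(all_in_pos, all_out_pos):
--     in_conf, in_rej, in_pos = all_in_pos
--     out_conf, out_rej, _ = all_out_pos
--
--     integrated_confirmed = {"total":[], "sub":[], "ins":[], "del":[]}
--     integrated_rejected = {"total":[], "sub":[], "ins":[], "del":[]}
--
--     for pos in sorted(in_pos["total"]):
--         for pos_type in in_conf:
--             if pos in in_conf[pos_type] or pos in out_conf[pos_type]: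
--                 integrated_confirmed[pos_type].append(pos)
--             elif pos in in_rej[pos_type] or pos in out_rej[pos_type]:
--                 integrated_rejected[pos_type].append(pos)
--     return integrated_confirmed, integrated_rejected, in_pos
-- ===== SOURCE B (Python) =====
-- def _integrate_confirmed_pos(all_in_pos, all_out_pos):
--     in_conf, in_rej, in_pos = all_in_pos
--     out_conf, out_rej, _ = all_out_pos
--
--     total = sorted(in_pos["total"])
--     integrated_confirmed = {}
--     integrated_rejected = {}
--     for pos_type in ("total", "sub", "ins", "del"):
--         if pos_type in in_conf:
--             conf_t = set(in_conf[pos_type]) | set(out_conf.get(pos_type, []))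
--             rej_t = (set(in_rej.get(pos_type, [])) | set(out_rej.get(pos_type, []))) - conf_t
--             integrated_confirmed[pos_type] = [p for p in total if p in conf_t]
--             integrated_rejected[pos_type] = [p for p in total if p in rej_t]
--         else:
--             integrated_confirmed[pos_type] = []
--             integrated_rejected[pos_type] = []
--     return integrated_confirmed, integrated_rejected, in_pos
-- ===== Notes on version B (the rewrite author's own statement) =====
-- stated objective: idiomatic
-- what changed: A classifies each sorted position inside a nested loop over in_conf's keys with an if/elif chain; B instead builds, per fixed pos_type, the confirmed set in_conf|out_conf and the rejected set (in_rej|out_rej)-confirmed once and filters the sorted total list against them.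
import Mathlib
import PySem

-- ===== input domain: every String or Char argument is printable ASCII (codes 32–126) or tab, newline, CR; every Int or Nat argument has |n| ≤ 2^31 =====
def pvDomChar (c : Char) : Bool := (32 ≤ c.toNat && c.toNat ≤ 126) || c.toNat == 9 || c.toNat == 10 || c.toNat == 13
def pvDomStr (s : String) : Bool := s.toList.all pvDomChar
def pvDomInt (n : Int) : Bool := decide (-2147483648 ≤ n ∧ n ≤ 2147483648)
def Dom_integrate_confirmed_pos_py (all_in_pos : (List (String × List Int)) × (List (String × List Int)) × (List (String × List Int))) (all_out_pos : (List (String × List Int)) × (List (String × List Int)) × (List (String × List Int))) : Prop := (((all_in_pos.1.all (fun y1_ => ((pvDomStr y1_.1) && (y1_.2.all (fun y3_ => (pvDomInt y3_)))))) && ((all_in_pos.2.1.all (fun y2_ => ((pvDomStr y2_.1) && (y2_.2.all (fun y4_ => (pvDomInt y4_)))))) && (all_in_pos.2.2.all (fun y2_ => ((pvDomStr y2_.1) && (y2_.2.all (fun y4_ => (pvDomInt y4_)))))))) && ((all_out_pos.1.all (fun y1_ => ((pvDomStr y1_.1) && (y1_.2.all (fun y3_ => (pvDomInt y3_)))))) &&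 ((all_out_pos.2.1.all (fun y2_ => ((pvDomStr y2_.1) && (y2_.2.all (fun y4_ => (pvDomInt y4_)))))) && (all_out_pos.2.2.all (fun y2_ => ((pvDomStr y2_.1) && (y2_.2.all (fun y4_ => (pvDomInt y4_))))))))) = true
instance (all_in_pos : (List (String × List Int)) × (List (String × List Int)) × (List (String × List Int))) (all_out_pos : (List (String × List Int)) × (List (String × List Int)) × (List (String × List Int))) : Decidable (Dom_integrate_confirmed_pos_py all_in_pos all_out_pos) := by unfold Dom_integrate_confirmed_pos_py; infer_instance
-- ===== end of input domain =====

-- B replaces A's per-position classification loop over in_conf's keys by per-type set algebra over the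
-- four fixed keys (confirmed = total ∩ (in_conf ∪ out_conf), rejected = total ∩ (in_rej ∪ out_rej) \ confirmed);
-- objective: idiomatic/alternative, same asymptotic cost, no claim of speed.

-- dict lookup on the association-list encoding (first match; none = KeyError)
def pvLookup (d : List (String × List Int)) (k : String) : Option (List Int) :=
  match d with
  | [] => none
  | (k', v) :: r => if k' = k then some v else pvLookup r k

-- the four keys of the literal dicts {"total":[], "sub":[], "ins":[], "del":[]}
def pvFour : List String := ["total", "sub", "ins", "del"]

-- ===== PORT A =====
-- Python's integrated_confirmed[pos_type].append(pos): update the (unique) entry of key k in place.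
-- (On a missing key Python raises KeyError; that input is excluded by Pre_, here it is a no-op.)
def pvAppendAt (d : List (String × List Int)) (k : String) (p : Int) : List (String × List Int) :=
  match d with
  | [] => []
  | (k', v) :: r => if k' = k then (k', v ++ [p]) :: r else (k', v) :: pvAppendAt r k p

def integrate_confirmed_pos_py (all_in_pos : (List (String × List Int)) × (List (String × List Int)) × (List (String × List Int))) (all_out_pos : (List (String × List Int)) × (List (String × List Int)) × (List (String × List Int))) : (List (String × List Int)) × (List (String × List Int)) × (List (String × List Int)) :=
  let in_conf := all_in_pos.1
  let in_rej := all_in_pos.2.1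
  let in_pos := all_in_pos.2.2
  let out_conf := all_out_pos.1
  let out_rej := all_out_pos.2.1
  let init : List (String × List Int) := [("total", []), ("sub", []), ("ins", []), ("del", [])]
  let res :=
    (PySem.List.sorted ((pvLookup in_pos "total").getD []) (fun x => x) false).foldl
      (fun st pos =>
        in_conf.foldl
          (fun st2 e =>
            let t := e.1
            if ((pvLookup in_conf t).getD []).contains pos
                || ((pvLookup out_conf t).getD []).contains pos then
              (pvAppendAt st2.1 t pos, st2.2)
            else if ((pvLookup in_rej t).getD []).contains pos
                || ((pvLookup out_rej t).getD []).contains pos then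
              (st2.1, pvAppendAt st2.2 t pos)
            else st2)
          st)
      (init, init)
  (res.1, res.2, in_pos)

-- ===== PORT B =====
def integrate_confirmed_pos_py_alt (all_in_pos : (List (String × List Int)) × (List (String × List Int)) × (List (String × List Int))) (all_out_pos : (List (String × List Int)) × (List (String × List Int)) × (List (String × List Int))) : (List (String × List Int)) × (List (String × List Int)) × (List (String × List Int)) :=
  let in_conf := all_in_pos.1
  let in_rej := all_in_pos.2.1
  let in_pos := all_in_pos.2.2
  let out_conf := all_out_pos.1
  let out_rej := all_out_pos.2.1
  let total := PySem.List.sorted ((pvLookup in_pos "total").getD []) (fun x => x) false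
  let entry := fun (t : String) =>
    if (pvLookup in_conf t).isSome then
      let conf_t := PySem.Set.union (PySem.Set.ofList ((pvLookup in_conf t).getD []))
                      (PySem.Set.ofList ((pvLookup out_conf t).getD []))
      let rej_t := PySem.Set.diff
                      (PySem.Set.union (PySem.Set.ofList ((pvLookup in_rej t).getD []))
                        (PySem.Set.ofList ((pvLookup out_rej t).getD []))) conf_t
      (total.filter (fun p => PySem.Set.contains conf_t p),
       total.filter (fun p => PySem.Set.contains rej_t p))
    else (([] : List Int), ([] : List Int))
  (pvFour.map (fun t => (t, (entry t).1)), pvFour.map (fun t => (t, (entry t).2)), in_pos)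

-- ===== PRECONDITION & SPEC =====
-- One reachable branch of the loop body for position p and type t performs only lookups/appends on
-- present keys (else Python raises KeyError on exactly that input).
def pvOkAt (in_conf out_conf in_rej out_rej : List (String × List Int)) (t : String) (p : Int) : Bool :=
  if ((List.lookup t in_conf).getD []).contains p then pvFour.contains t
  else
    match List.lookup t out_conf with
    | none => false
    | some oc =>
      if oc.contains p then pvFour.contains t
      else
        match List.lookup t in_rej with
        | none => false
        | some ir =>
          if ir.contains p then pvFour.contains t
          else
            match List.lookup t out_rej with
            | none => false
            | some orj => if orj.contains p then pvFour.contains t else true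

-- Pre_ holds exactly when the Python A returns normally: in_pos has key "total" and no reached
-- dict lookup or append hits a missing key; additionally it excludes association lists whose
-- in_conf part has duplicate keys, which do not encode any Python dict.
def Pre_integrate_confirmed_pos_py (all_in_pos : (List (String × List Int)) × (List (String × List Int)) × (List (String × List Int))) (all_out_pos : (List (String × List Int)) × (List (String × List Int)) × (List (String × List Int))) : Prop :=
  (List.lookup "total" all_in_pos.2.2).isSome = true ∧
  (all_in_pos.1.map Prod.fst).Nodup ∧
  ∀ t ∈ all_in_pos.1.map Prod.fst, ∀ p ∈ (List.lookup "total" all_in_pos.2.2).getD [],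
    pvOkAt all_in_pos.1 all_out_pos.1 all_in_pos.2.1 all_out_pos.2.1 t p = true
instance (all_in_pos : (List (String × List Int)) × (List (String × List Int)) × (List (String × List Int))) (all_out_pos : (List (String × List Int)) × (List (String × List Int)) × (List (String × List Int))) : Decidable (Pre_integrate_confirmed_pos_py all_in_pos all_out_pos) := by unfold Pre_integrate_confirmed_pos_py; infer_instance

def pvWitness_integrate_confirmed_pos_py : ((List (String × List Int)) × (List (String × List Int)) × (List (String × List Int))) × ((List (String × List Int)) × (List (String × List Int)) × (List (String × List Int))) :=
  (([("total", [1]), ("sub", [])], [("total", []), ("sub", [2])], [("total", [1, 2])]),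
   ([("total", []), ("sub", [])], [("total", [2]), ("sub", [])], []))

def Spec_integrate_confirmed_pos_py (all_in_pos : (List (String × List Int)) × (List (String × List Int)) × (List (String × List Int))) (all_out_pos : (List (String × List Int)) × (List (String × List Int)) × (List (String × List Int))) (out : (List (String × List Int)) × (List (String × List Int)) × (List (String × List Int))) : Prop := out = integrate_confirmed_pos_py_alt all_in_pos all_out_pos
instance (all_in_pos : (List (String × List Int)) × (List (String × List Int)) × (List (String × List Int))) (all_out_pos : (List (String × List Int)) × (List (String × List Int)) × (List (String × List Int))) (out : (List (String × List Int)) × (List (String × List Int)) × (List (String × List Int))) : Decidable (Spec_integrate_confirmed_pos_py all_in_pos all_out_pos out) := by unfold Spec_integrate_confirmed_pos_py; infer_instance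

-- ===== CLAIM (what is proved, stated in full; the proofs are below) =====
def Claim_equal_integrate_confirmed_pos_py : Prop := ∀ (all_in_pos : (List (String × List Int)) × (List (String × List Int)) × (List (String × List Int))) (all_out_pos : (List (String × List Int)) × (List (String × List Int)) × (List (String × List Int))), Dom_integrate_confirmed_pos_py all_in_pos all_out_pos → Pre_integrate_confirmed_pos_py all_in_pos all_out_pos → Spec_integrate_confirmed_pos_py all_in_pos all_out_pos (integrate_confirmed_pos_py all_in_pos all_out_pos)

-- ===== LEMMAS AND PROOFS =====

-- the confirmed / rejected-raw tests of A's loop body, as predicates of the type t and position p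
def pvConfB (in_conf out_conf : List (String × List Int)) (t : String) (p : Int) : Bool :=
  ((pvLookup in_conf t).getD []).contains p || ((pvLookup out_conf t).getD []).contains p

def pvRejB (in_rej out_rej : List (String × List Int)) (t : String) (p : Int) : Bool :=
  ((pvLookup in_rej t).getD []).contains p || ((pvLookup out_rej t).getD []).contains p

-- the canonical shape of A's accumulator dicts: the four fixed keys with value function f
def pvG (f : String → List Int) : List (String × List Int) := pvFour.map (fun t => (t, f t))


lemma pvAppendAt_G (f : String → List Int) (u : String) (p : Int) :
    pvAppendAt (pvG f) u p = pvG (fun t => f t ++ if t = u then [p] else []) := by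
  simp only [pvG, pvFour, List.map_cons, List.map_nil, pvAppendAt]
  by_cases h1 : "total" = u <;> by_cases h2 : "sub" = u <;> by_cases h3 : "ins" = u <;>
    by_cases h4 : "del" = u <;> subst_vars <;> simp_all

lemma pvLookup_isSome (d : List (String × List Int)) (k : String) :
    (pvLookup d k).isSome = decide (k ∈ d.map Prod.fst) := by
  induction d with
  | nil => simp [pvLookup]
  | cons e r ih =>
    obtain ⟨k', v⟩ := e
    by_cases h : k' = k
    · subst h; simp [pvLookup]
    · simp [pvLookup, h, ih, Ne.symm h]

lemma pv_inner_fold (in_conf out_conf in_rej out_rej : List (String × List Int)) (p : Int)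
    (l : List (String × List Int)) (hN : (l.map Prod.fst).Nodup) (f g : String → List Int) :
    l.foldl
      (fun st2 (e : String × List Int) =>
        let t := e.1
        if ((pvLookup in_conf t).getD []).contains p
            || ((pvLookup out_conf t).getD []).contains p then
          (pvAppendAt st2.1 t p, st2.2)
        else if ((pvLookup in_rej t).getD []).contains p
            || ((pvLookup out_rej t).getD []).contains p then
          (st2.1, pvAppendAt st2.2 t p)
        else st2)
      (pvG f, pvG g)
    = (pvG (fun t => f t ++
          if decide (t ∈ l.map Prod.fst) && pvConfB in_conf out_conf t p then [p] else []),
       pvG (fun t => g t ++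
          if decide (t ∈ l.map Prod.fst) && !pvConfB in_conf out_conf t p
              && pvRejB in_rej out_rej t p then [p] else [])) := by
  induction l generalizing f g with
  | nil => simp [pvG]
  | cons e r ih =>
    obtain ⟨t0, v⟩ := e
    simp only [List.map_cons, List.nodup_cons] at hN
    obtain ⟨ht0, hNr⟩ := hN
    have hr0 : decide (t0 ∈ r.map Prod.fst) = false := by
      simpa using ht0
    simp only [List.foldl_cons]
    by_cases hc : pvConfB in_conf out_conf t0 p = true
    · have hc' := hc; simp only [pvConfB] at hc'
      have hcp : p ∈ (pvLookup in_conf t0).getD [] ∨ p ∈ (pvLookup out_conf t0).getD [] := by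
        simpa using hc'
      simp only [hc', if_pos, pvAppendAt_G]
      rw [ih hNr]
      simp only [Prod.mk.injEq]; refine ⟨?_, ?_⟩ <;> apply congrArg pvG <;> funext t
      · by_cases ht : t = t0
        · subst ht
          simp [pvConfB, hr0]; tauto
        · have hmc : decide (t ∈ List.map Prod.fst ((t0, v) :: r)) = decide (t ∈ r.map Prod.fst) := by
              simp [List.mem_cons, ht]
          rw [hmc]
          try simp [ht]
      · by_cases ht : t = t0
        · subst ht
          simp [pvConfB, hr0]; tauto
        · have hmc : decide (t ∈ List.map Prod.fst ((t0, v) :: r)) = decide (t ∈ r.map Prod.fst) := by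
              simp [List.mem_cons, ht]
          rw [hmc]
          try simp [ht]
    · have hc' : (((pvLookup in_conf t0).getD []).contains p
          || ((pvLookup out_conf t0).getD []).contains p) = false := by
        simpa [pvConfB] using hc
      by_cases hr : pvRejB in_rej out_rej t0 p = true
      · have hr' := hr; simp only [pvRejB] at hr'
        have hcn : p ∉ (pvLookup in_conf t0).getD [] ∧ p ∉ (pvLookup out_conf t0).getD [] := by
          simpa using hc'
        have hrp : p ∈ (pvLookup in_rej t0).getD [] ∨ p ∈ (pvLookup out_rej t0).getD [] := by
          simpa using hr'
        simp only [hc', hr', Bool.false_eq_true, if_false, if_pos, pvAppendAt_G]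
        rw [ih hNr]
        simp only [Prod.mk.injEq]; refine ⟨?_, ?_⟩ <;> apply congrArg pvG <;> funext t
        · by_cases ht : t = t0
          · subst ht
            simp [pvConfB, hr0]; tauto
          · have hmc : decide (t ∈ List.map Prod.fst ((t0, v) :: r)) = decide (t ∈ r.map Prod.fst) := by
                simp [List.mem_cons, ht]
            rw [hmc]
            try simp [ht]
        · by_cases ht : t = t0
          · subst ht
            simp [pvConfB, pvRejB, hr0]; tauto
          · have hmc : decide (t ∈ List.map Prod.fst ((t0, v) :: r)) = decide (t ∈ r.map Prod.fst) := by
                simp [List.mem_cons, ht]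
            rw [hmc]
            try simp [ht]
      · have hr' : (((pvLookup in_rej t0).getD []).contains p
            || ((pvLookup out_rej t0).getD []).contains p) = false := by
          simpa [pvRejB] using hr
        have hcn : p ∉ (pvLookup in_conf t0).getD [] ∧ p ∉ (pvLookup out_conf t0).getD [] := by
          simpa using hc'
        have hrn : p ∉ (pvLookup in_rej t0).getD [] ∧ p ∉ (pvLookup out_rej t0).getD [] := by
          simpa using hr'
        simp only [hc', hr', Bool.false_eq_true, if_false]
        rw [ih hNr]
        simp only [Prod.mk.injEq]; refine ⟨?_, ?_⟩ <;> apply congrArg pvG <;> funext t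
        · by_cases ht : t = t0
          · subst ht
            simp [pvConfB, hr0]; tauto
          · have hmc : decide (t ∈ List.map Prod.fst ((t0, v) :: r)) = decide (t ∈ r.map Prod.fst) := by
                simp [List.mem_cons, ht]
            rw [hmc]
            try simp [ht]
        · by_cases ht : t = t0
          · subst ht
            simp [pvConfB, pvRejB, hr0]; tauto
          · have hmc : decide (t ∈ List.map Prod.fst ((t0, v) :: r)) = decide (t ∈ r.map Prod.fst) := by
                simp [List.mem_cons, ht]
            rw [hmc]
            try simp [ht]

lemma pv_outer_fold (in_conf out_conf in_rej out_rej : List (String × List Int))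
    (hN : (in_conf.map Prod.fst).Nodup) (ps : List Int) (f g : String → List Int) :
    ps.foldl
      (fun st pos =>
        in_conf.foldl
          (fun st2 (e : String × List Int) =>
            let t := e.1
            if ((pvLookup in_conf t).getD []).contains pos
                || ((pvLookup out_conf t).getD []).contains pos then
              (pvAppendAt st2.1 t pos, st2.2)
            else if ((pvLookup in_rej t).getD []).contains pos
                || ((pvLookup out_rej t).getD []).contains pos then
              (st2.1, pvAppendAt st2.2 t pos)
            else st2)
          st)
      (pvG f, pvG g)
    = (pvG (fun t => f t ++ ps.filter
          (fun p => decide (t ∈ in_conf.map Prod.fst) && pvConfB in_conf out_conf t p)),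
       pvG (fun t => g t ++ ps.filter
          (fun p => decide (t ∈ in_conf.map Prod.fst) && !pvConfB in_conf out_conf t p
              && pvRejB in_rej out_rej t p))) := by
  induction ps generalizing f g with
  | nil => simp
  | cons p ps ih =>
    simp only [List.foldl_cons]
    rw [pv_inner_fold in_conf out_conf in_rej out_rej p in_conf hN f g]
    rw [ih]
    simp only [Prod.mk.injEq]
    refine ⟨?_, ?_⟩ <;> apply congrArg pvG <;> funext t <;>
      simp [List.filter_cons] <;> split <;> simp

theorem integrate_confirmed_pos_py_spec : Claim_equal_integrate_confirmed_pos_py := by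
  intro aip aop _hDom hPre
  obtain ⟨hTot, hN, _hOk⟩ := hPre
  unfold Spec_integrate_confirmed_pos_py
  simp only [integrate_confirmed_pos_py, integrate_confirmed_pos_py_alt]
  have hinit : ([("total", []), ("sub", []), ("ins", []), ("del", [])] : List (String × List Int))
      = pvG (fun _ => []) := by rfl
  rw [hinit, pv_outer_fold aip.1 aop.1 aip.2.1 aop.2.1 hN]
  simp only [Prod.mk.injEq]
  refine ⟨?_, ?_, trivial⟩ <;> simp only [pvG] <;>
    apply List.map_congr_left <;> intro t _ht <;> refine congrArg (Prod.mk t) ?_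
  · by_cases hs : (pvLookup aip.1 t).isSome = true
    · have hk : decide (t ∈ aip.1.map Prod.fst) = true := by rw [← pvLookup_isSome]; exact hs
      simp only [hs, if_pos, hk, Bool.true_and, List.nil_append]
      apply List.filter_congr
      intro p _hp
      rw [Bool.eq_iff_iff]
      simp [pvConfB, PySem.Set.mem_union, PySem.Set.mem_ofList, List.contains_eq_mem]
    · have hk : decide (t ∈ aip.1.map Prod.fst) = false := by
        rw [← pvLookup_isSome]; simpa using hs
      simp [hs, hk]
  · by_cases hs : (pvLookup aip.1 t).isSome = true
    · have hk : decide (t ∈ aip.1.map Prod.fst) = true := by rw [← pvLookup_isSome]; exact hs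
      simp only [hs, if_pos, hk, Bool.true_and, List.nil_append]
      apply List.filter_congr
      intro p _hp
      rw [Bool.eq_iff_iff]
      simp [pvConfB, pvRejB, PySem.Set.mem_diff, PySem.Set.mem_union, PySem.Set.mem_ofList]
      tauto
    · have hk : decide (t ∈ aip.1.map Prod.fst) = false := by
        rw [← pvLookup_isSome]; simpa using hs
      simp [hs, hk]
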